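-- pv_equiv track=rewrite | github.com/Jyldn/AutoAnki | makecards.py | strip_punctuation
-- ===== SOURCE A (Python) =====
-- import string
--
-- def strip_punctuation(text: str) -> str:
--     """Remove punctuation from a string.
--     Remove apostrophes in the middle of words, but ensure a space is put in their place.
--     This is needed for French so that the lemmatiser doesn't tokenise words with their contracted articles.
--     Also removes the asterisks and hashtags used to mark tokens.
--
--     Arguments:
--         text: String to remove punctuation from
--
--     Returns:
--         String with punctuation removed
--     """
--     new_text = ''
--     for i in range(len(text)):
--         if text[i] == "'":
--             if i > 0 and i < len(text) - 1:
--                 # Check if the character is surrounded by alphabetical characters.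
--                 if text[i-1].isalpha() and text[i+1].isalpha():
--                     new_text += ' '
--                     continue
--         new_text += text[i]
--
--     # Remove other punctuation
--     exclude = set(string.punctuation) - {"'"}
--     for ch in exclude:
--         new_text = new_text.replace(ch, '')
--
--     return ' '.join(new_text.split())
-- ===== SOURCE B (Python) =====
-- import string
--
-- def strip_punctuation(text: str) -> str:
--     punct_no_apo = set(string.punctuation) - {"'"}
--     n = len(text)
--
--     def emit(i: int, c: str) -> str:
--         if c == "'" and 0 < i < n - 1 and text[i-1].isalpha() and text[i+1].isalpha():
--             return ' '
--         if c in punct_no_apo: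
--             return ''
--         return c
--
--     return ' '.join(''.join(emit(i, c) for i, c in enumerate(text)).split())
-- ===== Notes on version B (the rewrite author's own statement) =====
-- stated objective: simpler
-- what changed: B replaces A's two-phase pipeline (index loop building an intermediate string, then 31 separate str.replace sweeps, one per punctuation character) by a single indexed pass that decides each character once (space / drop / keep) before the final whitespace collapse.
import Mathlib
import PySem

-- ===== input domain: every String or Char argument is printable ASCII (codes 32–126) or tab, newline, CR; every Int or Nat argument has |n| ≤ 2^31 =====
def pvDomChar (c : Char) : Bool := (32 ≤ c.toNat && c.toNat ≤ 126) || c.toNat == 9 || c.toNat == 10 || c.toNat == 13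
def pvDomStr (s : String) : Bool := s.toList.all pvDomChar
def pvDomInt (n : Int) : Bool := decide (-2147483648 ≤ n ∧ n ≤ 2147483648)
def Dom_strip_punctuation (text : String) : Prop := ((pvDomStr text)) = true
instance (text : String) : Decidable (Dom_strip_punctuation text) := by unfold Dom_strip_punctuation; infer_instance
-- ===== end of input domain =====

-- B fuses A's index loop + 31 per-character replace sweeps into one indexed pass; objective: simpler.

-- string.punctuation (shared module-level constant of the Python stdlib)
def pvPunct : List Char := "!\"#$%&'()*+,-./:;<=>?@[\\]^_`{|}~".toList

-- ===== PORT A =====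
-- The Python iterates `exclude` (a set) in CPython's hash order; each sweep deletes one
-- distinct character, so the order is immaterial; the port folds over the set's list.
def strip_punctuation (text : String) : String :=
  let cs := text.toList
  let n : Int := cs.length
  let newText : List Char :=
    (PySem.List.pyRange 0 n 1).foldl (fun acc i =>
      if PySem.List.pyGetD cs i ' ' == '\'' then
        if decide (i > 0) && decide (i < n - 1) then
          if PySem.Chars.isalpha (PySem.List.pyGetD cs (i - 1) ' ')
              && PySem.Chars.isalpha (PySem.List.pyGetD cs (i + 1) ' ') then
            acc ++ [' ']
          else acc ++ [PySem.List.pyGetD cs i ' ']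
        else acc ++ [PySem.List.pyGetD cs i ' ']
      else acc ++ [PySem.List.pyGetD cs i ' ']) []
  let exclude : PySem.Set Char := PySem.Set.diff (PySem.Set.ofList pvPunct) (PySem.Set.ofList ['\''])
  let cleaned := exclude.foldl (fun s ch => PySem.Chars.replace s [ch] []) newText
  String.mk (PySem.Chars.join [' '] (PySem.Chars.split₀ cleaned))

-- ===== PORT B =====
def strip_punctuation_alt (text : String) : String :=
  let cs := text.toList
  let n : Int := cs.length
  let punctNoApo : PySem.Set Char := PySem.Set.diff (PySem.Set.ofList pvPunct) (PySem.Set.ofList ['\''])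
  let out : List Char :=
    (PySem.List.enumerate cs).flatMap (fun p =>
      if p.2 == '\'' && decide (0 < p.1) && decide (p.1 < n - 1)
          && PySem.Chars.isalpha (PySem.List.pyGetD cs (p.1 - 1) ' ')
          && PySem.Chars.isalpha (PySem.List.pyGetD cs (p.1 + 1) ' ') then [' ']
      else if punctNoApo.contains p.2 then []
      else [p.2])
  String.mk (PySem.Chars.join [' '] (PySem.Chars.split₀ out))

-- ===== PRECONDITION & SPEC =====
def Spec_strip_punctuation (text : String) (out : String) : Prop := out = strip_punctuation_alt text
instance (text : String) (out : String) : Decidable (Spec_strip_punctuation text out) := by unfold Spec_strip_punctuation; infer_instance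

-- ===== CLAIM (what is proved, stated in full; the proofs are below) =====
def Claim_equal_strip_punctuation : Prop := ∀ (text : String), Dom_strip_punctuation text → Spec_strip_punctuation text (strip_punctuation text)

-- ===== LEMMAS AND PROOFS =====

-- replace.go with a single-character pattern and empty replacement is a filter
theorem replace_go_singleton (a : Char) : ∀ (fuel : Nat) (l acc : List Char), l.length ≤ fuel →
    PySem.Chars.replace.go [a] [] fuel l acc = acc.reverse ++ l.filter (fun c => !(c == a)) := by
  intro fuel
  induction fuel with
  | zero =>
    intro l acc h
    cases l with
    | nil => simp [PySem.Chars.replace.go]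
    | cons c t => simp at h
  | succ fuel ih =>
    intro l acc h
    cases l with
    | nil => simp [PySem.Chars.replace.go]
    | cons c t =>
      have ht : t.length ≤ fuel := by simpa using Nat.lt_succ_iff.mp (Nat.lt_of_lt_of_le (by simp) h)
      simp only [PySem.Chars.replace.go]
      by_cases hc : c = a
      · subst hc
        have hp : List.isPrefixOf [c] (c :: t) = true := by simp [List.isPrefixOf]
        simp only [hp, if_true, List.length_singleton, List.drop_succ_cons, List.drop_zero,
          List.reverse_nil, List.nil_append]
        rw [ih t acc ht]
        simp
      · have hp : List.isPrefixOf [a] (c :: t) = false := by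
          simp [List.isPrefixOf, beq_eq_false_iff_ne.mpr (Ne.symm hc)]
        simp only [hp, Bool.false_eq_true, if_false]
        rw [ih t (c :: acc) ht]
        simp [hc]

-- str.replace(ch, '') deletes exactly the occurrences of ch
theorem replace_singleton (a : Char) (s : List Char) :
    PySem.Chars.replace s [a] [] = s.filter (fun c => !(c == a)) := by
  simp only [PySem.Chars.replace, List.isEmpty_cons, Bool.false_eq_true, if_false]
  exact replace_go_singleton a s.length s [] le_rfl

-- sweeping replace(ch, '') over a list of characters is one filter by membership
theorem foldl_replace_eq_filter : ∀ (ex s : List Char),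
    ex.foldl (fun s ch => PySem.Chars.replace s [ch] []) s
      = s.filter (fun c => !(ex.contains c)) := by
  intro ex
  induction ex with
  | nil => intro s; simp
  | cons e ex ih =>
    intro s
    rw [List.foldl_cons, ih (PySem.Chars.replace s [e] []), replace_singleton, List.filter_filter]
    apply List.filter_congr
    intro c _
    by_cases h1 : c = e <;> by_cases h2 : c ∈ ex <;> simp [h1, h2]

theorem flatMap_congr_mem {a b : Type} (l : List a) (f g : a → List b)
    (h : ∀ x ∈ l, f x = g x) : l.flatMap f = l.flatMap g := by
  induction l with
  | nil => rfl
  | cons x xs ih =>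
    simp only [List.flatMap_cons, h x (List.mem_cons_self), ih (fun y hy => h y (List.mem_cons_of_mem x hy))]

theorem filter_flatMap {a b : Type} (l : List a) (f : a → List b) (p : b → Bool) :
    (l.flatMap f).filter p = l.flatMap (fun x => (f x).filter p) := by
  induction l with
  | nil => rfl
  | cons x xs ih => simp [List.flatMap_cons, ih]

-- ===== VERDICT (by name: the statement is the Claim_ definition above) =====

theorem strip_punctuation_spec : Claim_equal_strip_punctuation := by
  intro text _hdom
  unfold Spec_strip_punctuation strip_punctuation strip_punctuation_alt
  dsimp only
  set cs := text.toList with hcs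
  set n : Int := (cs.length : Int) with hn
  set ex : PySem.Set Char :=
    PySem.Set.diff (PySem.Set.ofList pvPunct) (PySem.Set.ofList ['\'']) with hex
  -- A's phase-1 loop: rewrite each branch into accumulator-append form
  rw [PySem.List.foldl_congr_mem (PySem.List.pyRange 0 n 1) _
      (fun acc i => acc ++
        (if PySem.List.pyGetD cs i ' ' == '\'' then
          if decide (i > 0) && decide (i < n - 1) then
            if PySem.Chars.isalpha (PySem.List.pyGetD cs (i - 1) ' ')
                && PySem.Chars.isalpha (PySem.List.pyGetD cs (i + 1) ' ') then [' ']
            else [PySem.List.pyGetD cs i ' ']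
          else [PySem.List.pyGetD cs i ' ']
        else [PySem.List.pyGetD cs i ' '])) []
      (by intro acc i _; dsimp only; split_ifs <;> rfl)]
  rw [PySem.List.foldl_append_eq_flatMap, foldl_replace_eq_filter, List.nil_append]
  rw [filter_flatMap]
  -- B's side: enumerate as a map over the same range
  rw [PySem.List.enumerate_eq_map_pyRange cs ' ', List.flatMap_map]
  have hlen : PySem.List.len cs = n := by simp [PySem.List.len, hn]
  rw [hlen]
  congr 3
  apply flatMap_congr_mem
  intro i _hi
  have h1 : ex.contains '\'' = false := by rw [hex]; decide
  have h2 : ex.contains ' ' = false := by rw [hex]; decide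
  cases hq : (PySem.List.pyGetD cs i ' ' == '\'') <;>
    cases hm2 : decide (0 < i) <;>
    cases hm3 : decide (i < n - 1) <;>
    cases ha1 : PySem.Chars.isalpha (PySem.List.pyGetD cs (i - 1) ' ') <;>
    cases ha2 : PySem.Chars.isalpha (PySem.List.pyGetD cs (i + 1) ' ') <;>
    cases hcx : List.contains ex (PySem.List.pyGetD cs i ' ') <;>
    simp_all [List.filter]
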